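-- pv_equiv track=rewrite | github.com/hanwgyu/CTCI_solution | etc/2019_Kakao_Blind/Muji_Mukbang.py | solution
-- ===== SOURCE A (Python) =====
-- def solution(food_times, k):
--     a = []
--     for food, time in enumerate(food_times):
--         a.append((time, food+1))
--     a.sort()
--
--     idx = 0
--     blocks = a[idx][0]*(len(food_times)-idx)
--     while k >= blocks:
--         k, idx = k-blocks, idx+1
--         if idx >= len(food_times):
--             return -1
--         blocks = (a[idx][0]-a[idx-1][0])*(len(food_times)-idx)
--     block = len(food_times)-idx
--     while k >= block:
--         k = k-block
--     new_a = [e[1] for e in a[idx:]]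
--     new_a.sort()
--     return new_a[k%len(new_a)]
-- ===== SOURCE B (Python) =====
-- def _eaten(food_times, r):
--     # units consumed after r complete cyclic rounds
--     return sum(min(t, r) for t in food_times)
--
--
-- def solution(food_times, k):
--     total = sum(food_times)
--     if k >= total:
--         return -1
--     # binary search the largest number of complete rounds r with _eaten(r) <= k
--     lo, hi = 0, max(food_times)
--     while lo < hi:
--         mid = (lo + hi + 1) // 2
--         if _eaten(food_times, mid) <= k:
--             lo = mid
--         else:
--             hi = mid - 1
--     q = k - _eaten(food_times, lo)
--     # the next food is the (q+1)-th one still needing more than lo seconds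
--     for i, t in enumerate(food_times):
--         if t > lo:
--             if q == 0:
--                 return i + 1
--             q -= 1
-- ===== Notes on version B (the rewrite author's own statement) =====
-- stated objective: alternative
-- what changed: B replaces A's sort-then-peel-time-levels loop (whose leftover 'while k >= block: k -= block' walks one block per iteration) by a sort-free binary search over the number of complete eating rounds r maximising sum(min(t,r)) <= k, followed by one linear scan for the (q+1)-th food still needing time.
-- outside the precondition, e.g. on solution([3, 1], -1): A returns 2, B returns None; on solution([], 0): A raises IndexError, B returns -1
import Mathlib
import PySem

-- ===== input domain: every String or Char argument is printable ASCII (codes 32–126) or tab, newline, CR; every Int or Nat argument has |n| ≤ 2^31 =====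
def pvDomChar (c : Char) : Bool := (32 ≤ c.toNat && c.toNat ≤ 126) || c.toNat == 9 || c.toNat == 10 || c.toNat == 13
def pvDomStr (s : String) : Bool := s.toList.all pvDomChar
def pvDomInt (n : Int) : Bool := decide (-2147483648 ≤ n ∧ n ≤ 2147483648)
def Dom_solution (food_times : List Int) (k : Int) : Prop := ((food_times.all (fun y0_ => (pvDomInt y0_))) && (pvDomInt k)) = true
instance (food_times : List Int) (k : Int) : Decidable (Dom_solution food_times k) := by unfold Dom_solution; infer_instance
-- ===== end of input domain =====

-- B replaces A's sort-and-peel-time-levels loop by a sort-free binary search for the number of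
-- complete eating rounds plus one scan (an alternative algorithm computing the same value).
-- Return-value equivalence only; neither version mutates its argument observably (A sorts a copy).

-- ===== PORT A =====

-- a[j][0]; every call site is guarded so that j is in range (Python would raise IndexError otherwise)
def pvFst (a : List (Int × Int)) (j : Nat) : Int := (a.getD j (0, 0)).1

-- the 'for food, time in enumerate(food_times): a.append((time, food+1))' loop
def pvPairs (food_times : List Int) : List (Int × Int) :=
  (PySem.List.enumerate food_times 0).foldl (fun acc ft => acc ++ [(ft.2, ft.1 + 1)]) []

-- 'while k >= block: k = k-block'; fuel k.toNat+1 suffices at every reachable call (block ≥ 1 there;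
-- with block ≤ 0 ≤ k the Python loop would not terminate)
def pvLoop2 : Nat → Int → Int → Int
  | 0, k, _ => k
  | fuel + 1, k, block => if block ≤ k then pvLoop2 fuel (k - block) block else k

-- the tail of A after the first while loop: block, the second while loop, new_a and the final indexing
def pvAfter (a : List (Int × Int)) (n : Nat) (k : Int) (idx : Nat) : Int :=
  let block : Int := (n : Int) - (idx : Int)
  let k2 := pvLoop2 (k.toNat + 1) k block
  let new_a := PySem.List.sorted ((a.drop idx).map (fun e => e.2)) (fun x => x) false  -- a[idx:] (idx ≥ 0)
  if new_a.length = 0 then -1  -- unreachable at call sites (Python: ZeroDivisionError in k % len)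
  else PySem.List.pyGetD new_a (PySem.Int.mod k2 (new_a.length : Int)) 0

-- 'while k >= blocks: …' of A; the loop body runs at most n - idx times (the idx >= n return),
-- so fuel = n - idx at entry makes the recursion structural without changing any reachable value
def pvLoop1 (a : List (Int × Int)) (n : Nat) : Nat → Int → Nat → Int → Int
  | fuel + 1, k, idx, blocks =>
    if blocks ≤ k then
      let k' := k - blocks
      let idx' := idx + 1
      if n ≤ idx' then -1
      else pvLoop1 a n fuel k' idx' ((pvFst a idx' - pvFst a idx) * ((n : Int) - (idx' : Int)))
    else pvAfter a n k idx
  | 0, k, idx, blocks =>  -- only reachable with idx ≥ n, where the loop body returns -1 at once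
    if blocks ≤ k then -1 else pvAfter a n k idx

def solution (food_times : List Int) (k : Int) : Int :=
  let a := PySem.List.sorted2 (pvPairs food_times) Prod.fst Prod.snd false  -- a.sort() on tuples
  let n := food_times.length
  pvLoop1 a n n k 0 (pvFst a 0 * (n : Int))

-- ===== PORT B =====

-- sum(min(t, r) for t in food_times)
def pvEaten (food_times : List Int) (r : Int) : Int :=
  food_times.foldl (fun acc t => acc + min t r) 0

-- the 'while lo < hi' binary-search loop of B; hi - lo strictly shrinks every iteration, so
-- fuel = (hi - lo).toNat + 1 at entry makes the recursion structural without changing any value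
def pvBsearch (ft : List Int) (k : Int) : Nat → Int → Int → Int
  | fuel + 1, lo, hi =>
    if lo < hi then
      let mid := PySem.Int.floordiv (lo + hi + 1) 2
      if pvEaten ft mid ≤ k then pvBsearch ft k fuel mid hi else pvBsearch ft k fuel lo (mid - 1)
    else lo
  | 0, lo, _ => lo

-- the 'for i, t in enumerate(food_times): …' scan of B (the [] case is Python's fall-off-the-end;
-- it is unreachable for inputs inside Pre_)
def pvScan : List (Int × Int) → Int → Int → Int
  | [], _, _ => -1
  | (i, t) :: rest, r, q =>
      if r < t then (if q = 0 then i + 1 else pvScan rest r (q - 1)) else pvScan rest r q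

def solution_alt (food_times : List Int) (k : Int) : Int :=
  let total := food_times.foldl (· + ·) 0  -- sum(food_times)
  if total ≤ k then -1
  else
    let hi := (PySem.List.max? food_times (fun x => x)).getD 0  -- max(food_times); list provably nonempty here
    let r := pvBsearch food_times k ((hi - 0).toNat + 1) 0 hi
    let q := k - pvEaten food_times r
    pvScan (PySem.List.enumerate food_times 0) r q

-- ===== PRECONDITION & SPEC =====
-- Pre_ excludes the empty list, on which A raises IndexError at a[0], and negative k (negative
-- elapsed seconds, outside the task's natural domain): there A's fall-through indexes new_a with
-- Python's negative modulo while B's scan falls off the end and returns no int at all.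
def Pre_solution (food_times : List Int) (k : Int) : Prop :=
  food_times ≠ [] ∧ 0 ≤ k
instance (food_times : List Int) (k : Int) : Decidable (Pre_solution food_times k) := by
  unfold Pre_solution; infer_instance

def pvWitness_solution : List Int × Int := ([3, 1, 2], 5)

def Spec_solution (food_times : List Int) (k : Int) (out : Int) : Prop := out = solution_alt food_times k
instance (food_times : List Int) (k : Int) (out : Int) : Decidable (Spec_solution food_times k out) := by
  unfold Spec_solution; infer_instance

-- ===== CLAIM (what is proved, stated in full; the proofs are below) =====
def Claim_equal_solution : Prop := ∀ (food_times : List Int) (k : Int), Dom_solution food_times k → Pre_solution food_times k → Spec_solution food_times k (solution food_times k)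

-- ===== LEMMAS AND PROOFS =====

-- the list A builds before sorting, in closed form
def pairsOf (ts : List Int) : List (Int × Int) :=
  (PySem.List.enumerate ts 0).map (fun p => (p.2, p.1 + 1))

-- the foods still needing more than r seconds, with their 0-based positions, in list order
def surv (ts : List Int) (r : Int) : List (Int × Int) :=
  (PySem.List.enumerate ts 0).filter (fun p => decide (r < p.2))

theorem pvPairs_eq (ts : List Int) : pvPairs ts = pairsOf ts := by
  unfold pvPairs pairsOf
  simpa using PySem.List.foldl_append_singleton_eq_map (fun p : Int × Int => (p.2, p.1 + 1)) (PySem.List.enumerate ts 0) []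

theorem fst_pairsOf (ts : List Int) : (pairsOf ts).map (·.1) = ts := by
  unfold pairsOf
  rw [List.map_map]
  exact PySem.List.map_snd_enumerate ts 0

theorem pvEaten_foldl (r : Int) : ∀ (ts : List Int) (init : Int),
    ts.foldl (fun acc t => acc + min t r) init = init + (ts.map (fun t => min t r)).sum := by
  intro ts
  induction ts with
  | nil => simp
  | cons t ts ih => intro init; simp [List.foldl_cons, ih]; ring

theorem pvEaten_eq (ts : List Int) (r : Int) : pvEaten ts r = (ts.map (fun t => min t r)).sum := by
  unfold pvEaten; rw [pvEaten_foldl]; ring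

theorem pvEaten_mono (ts : List Int) {r r' : Int} (h : r ≤ r') : pvEaten ts r ≤ pvEaten ts r' := by
  rw [pvEaten_eq, pvEaten_eq]
  induction ts with
  | nil => simp
  | cons t ts ih => simp only [List.map_cons, List.sum_cons]; have : min t r ≤ min t r' := by omega
                    omega

theorem pvEaten_zero (ts : List Int) (hnn : ∀ t ∈ ts, 0 ≤ t) : pvEaten ts 0 = 0 := by
  rw [pvEaten_eq]
  induction ts with
  | nil => simp
  | cons t ts ih =>
      have h0 : 0 ≤ t := hnn t (by simp)
      have := ih (fun x hx => hnn x (by simp [hx]))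
      simp only [List.map_cons, List.sum_cons, this]
      omega

theorem pvEaten_le_sum (ts : List Int) (r : Int) : pvEaten ts r ≤ ts.sum := by
  rw [pvEaten_eq]
  induction ts with
  | nil => simp
  | cons t ts ih => simp only [List.map_cons, List.sum_cons]; omega

theorem pvEaten_succ (ts : List Int) (r : Int) :
    pvEaten ts (r + 1) = pvEaten ts r + ((ts.filter (fun t => decide (r < t))).length : Int) := by
  rw [pvEaten_eq, pvEaten_eq]
  induction ts with
  | nil => simp
  | cons t ts ih =>
      simp only [List.map_cons, List.sum_cons, List.filter_cons]
      by_cases h : r < t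
      · simp only [h, decide_true, if_true, List.length_cons]
        push_cast
        have : min t (r + 1) = min t r + 1 := by omega
        omega
      · simp only [h, decide_false, Bool.false_eq_true, if_false]
        have : min t (r + 1) = min t r := by omega
        omega

theorem pvEaten_band (ts : List Int) (p : Int) :
    ∀ (j : Nat), (∀ t ∈ ts, t ≤ p ∨ p + (j : Int) ≤ t) →
      pvEaten ts (p + (j : Int)) = pvEaten ts p + (j : Int) * ((ts.filter (fun t => decide (p < t))).length : Int) := by
  intro j
  induction j with
  | zero => intro _; simp
  | succ j ih =>
      intro hdi
      have hdi' : ∀ t ∈ ts, t ≤ p ∨ p + (j : Int) ≤ t := by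
        intro t ht; rcases hdi t ht with h | h
        · exact Or.inl h
        · right; push_cast at h ⊢; omega
      have hstep : pvEaten ts (p + (j : Int) + 1)
          = pvEaten ts (p + (j : Int)) + ((ts.filter (fun t => decide (p + (j : Int) < t))).length : Int) :=
        pvEaten_succ ts (p + (j : Int))
      have hfe : ts.filter (fun t => decide (p + (j : Int) < t)) = ts.filter (fun t => decide (p < t)) := by
        apply List.filter_congr
        intro t ht
        rcases hdi t ht with h | h
        · simp only [decide_eq_decide]; push_cast at h ⊢; omega
        · simp only [decide_eq_decide]; push_cast at h ⊢; omega
      have := ih hdi'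
      push_cast
      push_cast at hstep hfe this
      rw [show p + ((j : Int) + 1) = p + (j : Int) + 1 by ring, hstep, hfe, this]
      ring

theorem pvEaten_all (ts : List Int) (M : Int) (h : ∀ t ∈ ts, t ≤ M) : pvEaten ts M = ts.sum := by
  rw [pvEaten_eq]
  induction ts with
  | nil => simp
  | cons t ts ih =>
      have h0 : t ≤ M := h t (by simp)
      have := ih (fun x hx => h x (by simp [hx]))
      simp only [List.map_cons, List.sum_cons, this]
      omega

theorem pvEaten_nonpos (ts : List Int) (r : Int) (hr : r ≤ 0) : pvEaten ts r ≤ 0 := by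
  rw [pvEaten_eq]
  induction ts with
  | nil => simp
  | cons t ts ih => simp only [List.map_cons, List.sum_cons]; omega

theorem pvEaten_min (ts : List Int) (M : Int) (h : ∀ t ∈ ts, M ≤ t) :
    pvEaten ts M = M * (ts.length : Int) := by
  rw [pvEaten_eq]
  induction ts with
  | nil => simp
  | cons t ts ih =>
      have h1 : min t M = M := by have := h t (by simp); omega
      have h2 := ih (fun x hx => h x (by simp [hx]))
      simp only [List.map_cons, List.sum_cons, List.length_cons, h1, h2]
      push_cast
      ring

theorem pvTotal_eq (ts : List Int) : ts.foldl (· + ·) 0 = ts.sum := by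
  simp [List.sum_eq_foldl]

theorem pvLoop2_eq (m : Int) (hm : 0 < m) :
    ∀ (fuel : Nat) (k : Int), 0 ≤ k → k.toNat < fuel → pvLoop2 fuel k m = k % m := by
  intro fuel
  induction fuel with
  | zero => intro k hk hf; omega
  | succ fuel ih =>
      intro k hk hf
      show (if m ≤ k then pvLoop2 fuel (k - m) m else k) = k % m
      by_cases h : m ≤ k
      · rw [if_pos h, ih (k - m) (by omega) (by omega), Int.sub_emod_right]
      · rw [if_neg h, Int.emod_eq_of_lt hk (by omega)]

theorem pvScan_spec (r : Int) :
    ∀ (l : List (Int × Int)) (q : Int), 0 ≤ q →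
      q.toNat < (l.filter (fun p => decide (r < p.2))).length →
      pvScan l r q = ((l.filter (fun p => decide (r < p.2))).getD q.toNat (0, 0)).1 + 1 := by
  intro l
  induction l with
  | nil => intro q _ h; simp at h
  | cons x rest ih =>
      intro q hq hlen
      obtain ⟨i, t⟩ := x
      show (if r < t then (if q = 0 then i + 1 else pvScan rest r (q - 1)) else pvScan rest r q) = _
      by_cases hrt : r < t
      · rw [if_pos hrt]
        have hfc : ((i, t) :: rest).filter (fun p => decide (r < p.2))
            = (i, t) :: rest.filter (fun p => decide (r < p.2)) := by
          simp [List.filter_cons, hrt]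
        by_cases hq0 : q = 0
        · subst hq0; simp [hfc]
        · rw [if_neg hq0, hfc]
          have hqt : q.toNat = (q - 1).toNat + 1 := by omega
          rw [hfc, List.length_cons] at hlen
          rw [hqt]
          simpa using ih (q - 1) (by omega) (by omega)
      · rw [if_neg hrt]
        have hfc : ((i, t) :: rest).filter (fun p => decide (r < p.2))
            = rest.filter (fun p => decide (r < p.2)) := by
          simp [List.filter_cons, hrt]
        rw [hfc]
        rw [hfc] at hlen
        exact ih q hq hlen

theorem pvBsearch_spec (ts : List Int) (k : Int) :
    ∀ (fuel : Nat) (lo hi : Int), (hi - lo).toNat < fuel → 0 ≤ lo → lo ≤ hi →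
      pvEaten ts lo ≤ k → k < pvEaten ts (hi + 1) →
      0 ≤ pvBsearch ts k fuel lo hi ∧ pvEaten ts (pvBsearch ts k fuel lo hi) ≤ k ∧
        k < pvEaten ts (pvBsearch ts k fuel lo hi + 1) := by
  intro fuel
  induction fuel with
  | zero => intro lo hi h; omega
  | succ fuel ih =>
      intro lo hi hf h0 hlh hlo hhi
      rw [pvBsearch]
      by_cases hlt : lo < hi
      · rw [if_pos hlt]
        have hmid : PySem.Int.floordiv (lo + hi + 1) 2 = (lo + hi + 1) / 2 :=
          PySem.Int.floordiv_eq_ediv_of_pos (by omega)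
        set mid := PySem.Int.floordiv (lo + hi + 1) 2 with hmid_def
        have hb1 : lo < mid := by rw [hmid_def]; omega
        have hb2 : mid ≤ hi := by rw [hmid_def]; omega
        by_cases hle : pvEaten ts mid ≤ k
        · rw [if_pos hle]
          exact ih mid hi (by omega) (by omega) hb2 hle hhi
        · rw [if_neg hle]
          have : k < pvEaten ts (mid - 1 + 1) := by
            rw [show mid - 1 + 1 = mid by ring]; omega
          exact ih lo (mid - 1) (by omega) h0 (by omega) hlo this
      · rw [if_neg hlt]
        have : hi = lo := by omega
        refine ⟨h0, hlo, ?_⟩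
        rw [← this]; exact hhi

theorem level_uniq (ts : List Int) (k r1 r2 : Int)
    (h1 : pvEaten ts r1 ≤ k) (h2 : k < pvEaten ts (r1 + 1))
    (h3 : pvEaten ts r2 ≤ k) (h4 : k < pvEaten ts (r2 + 1)) : r1 = r2 := by
  by_contra hne
  rcases lt_trichotomy r1 r2 with h | h | h
  · have := pvEaten_mono ts (show r1 + 1 ≤ r2 by omega)
    omega
  · exact hne h
  · have := pvEaten_mono ts (show r2 + 1 ≤ r1 by omega)
    omega

theorem surv_length (ts : List Int) (r : Int) :
    (surv ts r).length = (ts.filter (fun t => decide (r < t))).length := by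
  unfold surv
  have h1 : ∀ {α : Type} (p : α → Bool) (l : List α), (l.filter p).length = l.countP p := by
    intro α p l
    induction l with
    | nil => rfl
    | cons x xs ih => by_cases hx : p x <;> simp [List.filter_cons, List.countP_cons, hx, ih]
  rw [h1, h1]
  conv_rhs => rw [← PySem.List.map_snd_enumerate ts 0]
  rw [List.countP_map]
  rfl

theorem surv_pairwise (ts : List Int) (r : Int) :
    ((surv ts r).map (fun p => p.1 + 1)).Pairwise (fun a b => a < b) := by
  unfold surv
  rw [List.pairwise_map]
  exact ((PySem.List.pairwise_lt_enumerate ts 0).filter _).imp (by intro a b h; omega)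

-- B's value when the level r with  eaten r ≤ k < eaten (r+1)  is known
theorem altB_char (ts : List Int) (k : Int) (hne : ts ≠ []) (hk : 0 ≤ k)
    (r : Int) (h1 : pvEaten ts r ≤ k) (h2 : k < pvEaten ts (r + 1)) :
    solution_alt ts k = pvScan (PySem.List.enumerate ts 0) r (k - pvEaten ts r) := by
  unfold solution_alt
  rw [pvTotal_eq]
  have hksum : k < ts.sum := lt_of_lt_of_le h2 (pvEaten_le_sum ts (r + 1))
  rw [if_neg (by omega : ¬ ts.sum ≤ k)]
  obtain ⟨m, hm⟩ : ∃ m, PySem.List.max? ts (fun x => x) = some m := by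
    cases hmx : PySem.List.max? ts (fun x => x) with
    | none => exact absurd ((PySem.List.max?_eq_none_iff ts _).mp hmx) hne
    | some m => exact ⟨m, rfl⟩
  rw [hm]
  simp only [Option.getD_some]
  have hmax : ∀ t ∈ ts, t ≤ m := fun t ht => PySem.List.max?_isMax hm t ht
  have hm0 : 0 ≤ m := by
    by_contra hneg
    have hall0 : ∀ t ∈ ts, t ≤ 0 := fun t ht => le_trans (hmax t ht) (by omega)
    have he1 : pvEaten ts 0 = ts.sum := pvEaten_all ts 0 hall0
    have he2 : pvEaten ts 0 ≤ 0 := pvEaten_nonpos ts 0 le_rfl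
    omega
  have hsum : pvEaten ts (m + 1) = ts.sum := pvEaten_all ts (m + 1) (fun t ht => by have := hmax t ht; omega)
  have hz : pvEaten ts 0 ≤ k := le_trans (pvEaten_nonpos ts 0 le_rfl) hk
  have hspec := pvBsearch_spec ts k ((m - 0).toNat + 1) 0 m (by omega) le_rfl hm0
    hz (by omega)
  obtain ⟨hr0, hr1, hr2⟩ := hspec
  have := level_uniq ts k _ r hr1 hr2 h1 h2
  rw [this]

theorem altB_neg (ts : List Int) (k : Int) (hk : 0 ≤ k) (htot : ts.sum ≤ k) :
    solution_alt ts k = -1 := by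
  unfold solution_alt
  rw [pvTotal_eq, if_pos htot]

-- insertion sort (PySem.List.sorted2) keeps any weaker compatible order
theorem length_filter_countP {α : Type} (p : α → Bool) (l : List α) :
    (l.filter p).length = l.countP p := by
  induction l with
  | nil => rfl
  | cons x xs ih => by_cases hx : p x <;> simp [List.filter_cons, List.countP_cons, hx, ih]

theorem countP_enum_eq (ts : List Int) (r : Int) :
    (PySem.List.enumerate ts 0).countP (fun p => decide (r < p.2)) = ts.countP (fun t => decide (r < t)) := by
  conv_rhs => rw [← PySem.List.map_snd_enumerate ts 0]
  rw [List.countP_map]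
  rfl

theorem pairwise_insertBy {α : Type} (before : α → α → Bool) (le : α → α → Prop)
    (htr : ∀ a b c, le a b → le b c → le a c)
    (h1 : ∀ a b, before a b = true → le a b) (h2 : ∀ a b, before a b = false → le b a)
    (x : α) (ys : List α) (hys : ys.Pairwise le) :
    (PySem.List.insertBy before x ys).Pairwise le := by
  induction ys with
  | nil => simp [PySem.List.insertBy]
  | cons y ys ih =>
      show (if before x y = true then x :: y :: ys else y :: PySem.List.insertBy before x ys).Pairwise le
      rcases List.pairwise_cons.mp hys with ⟨hy, hys'⟩
      by_cases hb : before x y = true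
      · rw [if_pos hb]
        refine List.pairwise_cons.mpr ⟨?_, hys⟩
        intro z hz
        rcases List.mem_cons.mp hz with rfl | hz
        · exact h1 _ _ hb
        · exact htr _ _ _ (h1 _ _ hb) (hy z hz)
      · rw [if_neg hb]
        refine List.pairwise_cons.mpr ⟨?_, ih hys'⟩
        intro z hz
        rcases (PySem.List.mem_insertBy before x z ys).mp hz with rfl | hz
        · exact h2 _ _ (by simpa using hb)
        · exact hy z hz

theorem pairwise_foldl_insertBy {α : Type} (before : α → α → Bool) (le : α → α → Prop)
    (htr : ∀ a b c, le a b → le b c → le a c)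
    (h1 : ∀ a b, before a b = true → le a b) (h2 : ∀ a b, before a b = false → le b a) :
    ∀ (xs acc : List α), acc.Pairwise le →
      (xs.foldl (fun acc x => PySem.List.insertBy before x acc) acc).Pairwise le := by
  intro xs
  induction xs with
  | nil => intro acc h; exact h
  | cons x xs ih =>
      intro acc h
      exact ih _ (pairwise_insertBy before le htr h1 h2 x acc h)

theorem sorted2_pairwise_fst (xs : List (Int × Int)) :
    (PySem.List.sorted2 xs Prod.fst Prod.snd false).Pairwise (fun x y => x.1 ≤ y.1) := by
  show (xs.foldl (fun acc x => PySem.List.insertBy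
      (fun a b => decide (a.1 < b.1) || (!decide (b.1 < a.1) && decide (a.2 < b.2))) x acc) []).Pairwise _
  apply pairwise_foldl_insertBy _ (fun x y : Int × Int => x.1 ≤ y.1)
  · intro a b c h1 h2; omega
  · intro a b h; simp at h; omega
  · intro a b h; simp at h; omega
  · exact List.Pairwise.nil

theorem pvFst_eq (a : List (Int × Int)) (m : Nat) (hm : m < a.length) : pvFst a m = (a[m]).1 := by
  unfold pvFst; rw [List.getD_eq_getElem?_getD, List.getElem?_eq_getElem hm]; rfl

theorem dichotomy (a : List (Int × Int)) (hs : a.Pairwise (fun x y => x.1 ≤ y.1))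
    (idx : Nat) (hidx : idx < a.length) (p : Int) (hle : ∀ j, j < idx → pvFst a j ≤ p) :
    ∀ x ∈ a, x.1 ≤ p ∨ pvFst a idx ≤ x.1 := by
  intro x hx
  obtain ⟨j, hj, rfl⟩ := List.mem_iff_getElem.mp hx
  have hfst : ∀ (m : Nat) (hm : m < a.length), pvFst a m = (a[m]).1 := by
    intro m hm; unfold pvFst; rw [List.getD_eq_getElem?_getD, List.getElem?_eq_getElem hm]; rfl
  by_cases hji : j < idx
  · left
    have := hle j hji
    rwa [hfst j hj] at this
  · right
    rw [hfst idx hidx]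
    rcases Nat.eq_or_lt_of_le (Nat.le_of_not_lt hji) with rfl | hlt
    · rfl
    · exact (List.pairwise_iff_getElem.mp hs) idx j hidx hj hlt

theorem drop_filter (a : List (Int × Int)) (hs : a.Pairwise (fun x y => x.1 ≤ y.1))
    (idx : Nat) (hidx : idx < a.length) (r : Int)
    (hup : ∀ j, j < idx → pvFst a j ≤ r) (hdown : r < pvFst a idx) :
    a.filter (fun x => decide (r < x.1)) = a.drop idx := by
  have hfst : ∀ (m : Nat) (hm : m < a.length), pvFst a m = (a[m]).1 := by
    intro m hm; unfold pvFst; rw [List.getD_eq_getElem?_getD, List.getElem?_eq_getElem hm]; rfl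
  conv_lhs => rw [← List.take_append_drop idx a]
  rw [List.filter_append]
  have h1 : (a.take idx).filter (fun x => decide (r < x.1)) = [] := by
    rw [List.filter_eq_nil_iff]
    intro x hx
    obtain ⟨j, hj, rfl⟩ := List.mem_iff_getElem.mp hx
    have hjlen : j < a.length := lt_of_lt_of_le hj (by simp [List.length_take])
    have hjidx : j < idx := by simp [List.length_take] at hj; omega
    have := hup j hjidx
    rw [hfst j hjlen] at this
    simp only [List.getElem_take, decide_eq_true_eq]
    omega
  have h2 : (a.drop idx).filter (fun x => decide (r < x.1)) = a.drop idx := by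
    rw [List.filter_eq_self]
    intro x hx
    obtain ⟨j, hj, rfl⟩ := List.mem_iff_getElem.mp hx
    rw [List.getElem_drop]
    have hjlen : idx + j < a.length := by simp [List.length_drop] at hj; omega
    have hge : (a[idx]).1 ≤ (a[idx + j]).1 := by
      rcases Nat.eq_zero_or_pos j with rfl | hpos
      · simp
      · exact (List.pairwise_iff_getElem.mp hs) idx (idx + j) hidx hjlen (by omega)
    rw [hfst idx hidx] at hdown
    simp only [decide_eq_true_eq]
    omega
  rw [h1, h2, List.nil_append]

theorem countP_perm_ts (ts : List Int) (a : List (Int × Int)) (ha : a.Perm (pairsOf ts)) (r : Int) :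
    a.countP (fun x => decide (r < x.1)) = (ts.filter (fun t => decide (r < t))).length := by
  rw [ha.countP_eq, length_filter_countP]
  unfold pairsOf
  rw [List.countP_map, ← countP_enum_eq ts r]
  rfl

-- the invariant of A's first while loop (induction on the remaining indices)
theorem aloop_spec (ts : List Int) (k : Int) (hne : ts ≠ []) (hk : 0 ≤ k)
    (a : List (Int × Int)) (ha : a.Perm (pairsOf ts)) (hs : a.Pairwise (fun x y => x.1 ≤ y.1)) :
    ∀ (fuel : Nat) (idx : Nat) (p k' : Int), ts.length - idx ≤ fuel → idx < ts.length →
      0 ≤ k' → p ≤ pvFst a idx → (∀ j, j < idx → pvFst a j ≤ p) →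
      k' = k - pvEaten ts p →
      pvLoop1 a ts.length fuel k' idx ((pvFst a idx - p) * ((ts.length : Int) - (idx : Int)))
        = solution_alt ts k := by
  have halen : a.length = ts.length := by
    rw [ha.length_eq]
    unfold pairsOf
    rw [List.length_map, PySem.List.length_enumerate]
  have hmem_ts : ∀ x ∈ a, x.1 ∈ ts := by
    intro x hx
    have hx' : x ∈ pairsOf ts := ha.mem_iff.mp hx
    have : x.1 ∈ (pairsOf ts).map (·.1) := List.mem_map_of_mem hx'
    rwa [fst_pairsOf] at this
  intro fuel
  induction fuel with
  | zero => intro idx p k' hfuel hidx; omega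
  | succ fuel ih =>
      intro idx p k' hfuel hidx hk' hple hprev hkk
      have hidx' : idx < a.length := by omega
      have hdich : ∀ x ∈ a, x.1 ≤ p ∨ pvFst a idx ≤ x.1 := dichotomy a hs idx hidx' p hprev
      have hdich_ts : ∀ t ∈ ts, t ≤ p ∨ pvFst a idx ≤ t := by
        intro t ht
        rw [← fst_pairsOf ts] at ht
        obtain ⟨x, hx, rfl⟩ := List.mem_map.mp ht
        exact hdich x (ha.mem_iff.mpr hx)
      have hcount : p < pvFst a idx →
          ((ts.filter (fun t => decide (p < t))).length : Int) = (ts.length : Int) - (idx : Int) := by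
        intro hps
        have h1 : a.filter (fun x => decide (p < x.1)) = a.drop idx :=
          drop_filter a hs idx hidx' p hprev hps
        have h2 : a.countP (fun x => decide (p < x.1)) = (ts.filter (fun t => decide (p < t))).length :=
          countP_perm_ts ts a ha p
        rw [← h2, ← length_filter_countP, h1, List.length_drop]
        omega
      have hband : pvEaten ts (pvFst a idx)
          = pvEaten ts p + (pvFst a idx - p) * ((ts.length : Int) - (idx : Int)) := by
        rcases eq_or_lt_of_le hple with heq | hlt
        · rw [← heq]; ring
        · have hnat : ((pvFst a idx - p).toNat : Int) = pvFst a idx - p := by omega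
          have hb := pvEaten_band ts p (pvFst a idx - p).toNat (by
            intro t ht
            rcases hdich_ts t ht with h | h
            · exact Or.inl h
            · right; omega)
          rw [hcount hlt, hnat, show p + (pvFst a idx - p) = pvFst a idx by ring] at hb
          exact hb
      rw [pvLoop1]
      by_cases hcond : (pvFst a idx - p) * ((ts.length : Int) - (idx : Int)) ≤ k'
      · rw [if_pos hcond]
        by_cases hend : ts.length ≤ idx + 1
        · rw [if_pos hend]
          -- idx is the last index: every time is ≤ pvFst a idx, so everything is eaten by then
          have hidxlast : idx = a.length - 1 := by omega
          have hmax : ∀ x ∈ a, x.1 ≤ pvFst a idx := by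
            intro x hx
            obtain ⟨j, hj, rfl⟩ := List.mem_iff_getElem.mp hx
            rw [pvFst_eq a idx hidx']
            rcases Nat.lt_or_ge j idx with hlt | hge
            · exact (List.pairwise_iff_getElem.mp hs) j idx hj hidx' hlt
            · have : j = idx := by omega
              subst this; rfl
          have hmax_ts : ∀ t ∈ ts, t ≤ pvFst a idx := by
            intro t ht
            rw [← fst_pairsOf ts] at ht
            obtain ⟨x, hx, rfl⟩ := List.mem_map.mp ht
            exact hmax x (ha.mem_iff.mpr hx)
          have hsum : pvEaten ts (pvFst a idx) = ts.sum := pvEaten_all ts _ hmax_ts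
          rw [altB_neg ts k hk (by omega)]
        · rw [if_neg hend]
          have hadj : pvFst a idx ≤ pvFst a (idx + 1) := by
            rw [pvFst_eq a idx hidx', pvFst_eq a (idx + 1) (by omega)]
            exact (List.pairwise_iff_getElem.mp hs) idx (idx + 1) hidx' (by omega) (by omega)
          exact ih (idx + 1) (pvFst a idx) (k' - (pvFst a idx - p) * ((ts.length : Int) - (idx : Int)))
            (by omega) (by omega) (by omega) hadj
            (by
              intro j hj
              rcases Nat.lt_or_ge j idx with hlt | hge
              · exact le_trans (hprev j hlt) hple
              · have : j = idx := by omega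
                subst this; exact le_rfl)
            (by rw [hband]; omega)
      · rw [if_neg hcond]
        -- exit of the first while loop
        have hm1 : (1 : Int) ≤ (ts.length : Int) - (idx : Int) := by omega
        have hps : p < pvFst a idx := by
          by_contra hnot
          have hsp : pvFst a idx - p ≤ 0 := by omega
          nlinarith
        set m : Int := (ts.length : Int) - (idx : Int) with hm_def
        set b : Int := k' / m with hb_def
        set q : Int := k' % m with hq_def
        have hq0 : 0 ≤ q := Int.emod_nonneg k' (by omega)
        have hqm : q < m := Int.emod_lt_of_pos k' (by omega)
        have hdiv : m * b + q = k' := Int.ediv_add_emod k' m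
        have hb0 : 0 ≤ b := Int.ediv_nonneg hk' (by omega)
        have hbh : b < pvFst a idx - p := by
          by_contra hnot
          push_neg at hnot
          nlinarith
        have hband_at : ∀ (c : Int), 0 ≤ c → c ≤ pvFst a idx - p →
            pvEaten ts (p + c) = pvEaten ts p + c * m := by
          intro c hc0 hch
          have := pvEaten_band ts p c.toNat (by
            intro t ht
            rcases hdich_ts t ht with h | h
            · exact Or.inl h
            · right; omega)
          rw [hcount hps] at this
          have hcast : ((c.toNat : Int)) = c := by omega
          rw [hcast] at this
          exact this
        have hcomm : b * m = m * b := mul_comm b m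
        have h1 : pvEaten ts (p + b) ≤ k := by
          rw [hband_at b hb0 (by omega)]; omega
        have h2 : k < pvEaten ts (p + b + 1) := by
          have := hband_at (b + 1) (by omega) (by omega)
          rw [show p + b + 1 = p + (b + 1) by ring, this]
          nlinarith
        -- the filter at level p+b coincides with the filter at level p
        have hfilter_eq : ts.filter (fun t => decide (p + b < t)) = ts.filter (fun t => decide (p < t)) := by
          apply List.filter_congr
          intro t ht
          rcases hdich_ts t ht with h | h
          · simp only [decide_eq_decide]; omega
          · simp only [decide_eq_decide]; omega
        have hsurvlen : ((surv ts (p + b)).length : Int) = m := by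
          rw [surv_length, hfilter_eq]
          exact hcount hps
        -- A's side
        have hloop2 : pvLoop2 (k'.toNat + 1) k' m = q := pvLoop2_eq m (by omega) _ k' hk' (by omega)
        have hdroplen : (a.drop idx).length = ts.length - idx := by rw [List.length_drop]; omega
        set new_a := PySem.List.sorted ((a.drop idx).map (fun e => e.2)) (fun x => x) false with hnew_def
        have hnewlen : new_a.length = ts.length - idx := by
          rw [hnew_def, PySem.List.length_sorted, List.length_map, hdroplen]
        have hnewlen0 : ¬ new_a.length = 0 := by omega
        have hnewlenm : (new_a.length : Int) = m := by rw [hnewlen]; omega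
        show (if new_a.length = 0 then (-1 : Int)
              else PySem.List.pyGetD new_a
                (PySem.Int.mod (pvLoop2 (k'.toNat + 1) k' ((ts.length : Int) - (idx : Int)))
                  (new_a.length : Int)) 0) = solution_alt ts k
        rw [if_neg hnewlen0, ← hm_def, hloop2]
        have hmodq : PySem.Int.mod q (new_a.length : Int) = q := by
          rw [hnewlenm, PySem.Int.mod_eq_emod_of_pos (by omega)]
          exact Int.emod_eq_of_lt hq0 hqm
        rw [hmodq, PySem.List.pyGetD_of_nonneg new_a 0 hq0]
        -- B's side
        have hr := altB_char ts k hne hk (p + b) h1 h2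
        have hqk : k - pvEaten ts (p + b) = q := by
          rw [hband_at b hb0 (by omega)]; omega
        rw [hr, hqk]
        have hqlen : q.toNat < (surv ts (p + b)).length := by omega
        have hslfilter : q.toNat <
            ((PySem.List.enumerate ts 0).filter (fun pr => decide (p + b < pr.2))).length := hqlen
        rw [pvScan_spec (p + b) (PySem.List.enumerate ts 0) q hq0 hslfilter]
        -- new_a is exactly the ids of the survivors in index order
        have hdropf : a.filter (fun x => decide (p + b < x.1)) = a.drop idx :=
          drop_filter a hs idx hidx' (p + b)
            (fun j hj => le_trans (hprev j hj) (by omega)) (by omega)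
        have hpf : (a.filter (fun x => decide (p + b < x.1))).Perm
            ((pairsOf ts).filter (fun x => decide (p + b < x.1))) := ha.filter _
        rw [hdropf] at hpf
        have hmapped := hpf.map (fun e : Int × Int => e.2)
        have hps_eq : ((pairsOf ts).filter (fun x => decide (p + b < x.1))).map (fun e : Int × Int => e.2)
            = (surv ts (p + b)).map (fun pr => pr.1 + 1) := by
          unfold pairsOf surv
          rw [List.filter_map, List.map_map]
          rfl
        rw [hps_eq] at hmapped
        have hnew_eq : new_a = (surv ts (p + b)).map (fun pr => pr.1 + 1) := by
          rw [hnew_def]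
          exact PySem.List.sorted_eq_of_perm_of_pairwise_lt _ _ _ hmapped.symm (surv_pairwise ts (p + b))
        rw [hnew_eq]
        show ((surv ts (p + b)).map (fun pr => pr.1 + 1)).getD q.toNat 0
            = ((surv ts (p + b)).getD q.toNat (0, 0)).1 + 1
        rw [List.getD_eq_getElem?_getD, List.getD_eq_getElem?_getD, List.getElem?_map,
          List.getElem?_eq_getElem hqlen]
        simp
  

-- ===== VERDICT (by name: the statement is the Claim_ definition above) =====
theorem solution_spec : Claim_equal_solution := by
  unfold Claim_equal_solution
  intro ts k hdom hpre
  unfold Spec_solution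
  have hne : ts ≠ [] := hpre.1
  have hk : 0 ≤ k := hpre.2
  have hn1 : 0 < ts.length := List.length_pos_iff.mpr hne
  show pvLoop1 (PySem.List.sorted2 (pvPairs ts) Prod.fst Prod.snd false) ts.length ts.length k 0
      (pvFst (PySem.List.sorted2 (pvPairs ts) Prod.fst Prod.snd false) 0 * (ts.length : Int))
      = solution_alt ts k
  set a := PySem.List.sorted2 (pvPairs ts) Prod.fst Prod.snd false with ha_def
  have ha : a.Perm (pairsOf ts) := by
    rw [ha_def, ← pvPairs_eq]
    exact PySem.List.sorted2_perm (pvPairs ts) Prod.fst Prod.snd false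
  have hs : a.Pairwise (fun x y => x.1 ≤ y.1) := by
    rw [ha_def]; exact sorted2_pairwise_fst (pvPairs ts)
  have halen : a.length = ts.length := by
    rw [ha.length_eq]
    unfold pairsOf
    rw [List.length_map, PySem.List.length_enumerate]
  -- the head of the sorted list is a lower bound for every time
  have hminall : ∀ t ∈ ts, pvFst a 0 ≤ t := by
    intro t ht
    rw [← fst_pairsOf ts] at ht
    obtain ⟨x, hx, rfl⟩ := List.mem_map.mp ht
    obtain ⟨j, hj, rfl⟩ := List.mem_iff_getElem.mp (ha.mem_iff.mpr hx)
    rw [pvFst_eq a 0 (by omega)]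
    rcases Nat.eq_zero_or_pos j with rfl | hpos
    · exact le_rfl
    · exact (List.pairwise_iff_getElem.mp hs) 0 j (by omega) hj (by omega)
  by_cases hs0 : 0 ≤ pvFst a 0
  · -- every time is nonnegative: the loop invariant holds at idx = 0 with p = 0
    have hnn : ∀ t ∈ ts, 0 ≤ t := fun t ht => le_trans hs0 (hminall t ht)
    have hz : pvEaten ts 0 = 0 := pvEaten_zero ts hnn
    have hmain := aloop_spec ts k hne hk a ha hs ts.length 0 0 k
      (by omega) hn1 hk hs0 (by intro j hj; omega) (by omega)
    rw [show pvFst a 0 * (ts.length : Int)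
        = (pvFst a 0 - 0) * ((ts.length : Int) - ((0 : Nat) : Int)) by push_cast; ring]
    exact hmain
  · -- the minimum time is negative: A's first loop iteration always fires (blocks < 0 ≤ k);
    -- peel it by hand and enter the invariant at idx = 1 with p = the minimum
    have hs0' : pvFst a 0 < 0 := by omega
    obtain ⟨f, hf⟩ : ∃ f, ts.length = f + 1 := ⟨ts.length - 1, by omega⟩
    rw [hf]
    rw [pvLoop1]
    have hnpos : (0 : Int) < ((f + 1 : Nat) : Int) := by push_cast; omega
    have hblk : pvFst a 0 * ((f + 1 : Nat) : Int) ≤ k := by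
      have := mul_neg_of_neg_of_pos hs0' hnpos
      omega
    rw [if_pos hblk]
    have heat : pvEaten ts (pvFst a 0) = pvFst a 0 * ((f + 1 : Nat) : Int) := by
      have := pvEaten_min ts (pvFst a 0) hminall
      rwa [hf] at this
    by_cases hone : f = 0
    · subst hone
      rw [if_pos (by omega)]
      -- a single food with negative time: everything is already exhausted
      have hmaxall : ∀ t ∈ ts, t ≤ pvFst a 0 := by
        intro t ht
        rw [← fst_pairsOf ts] at ht
        obtain ⟨x, hx, rfl⟩ := List.mem_map.mp ht
        obtain ⟨j, hj, rfl⟩ := List.mem_iff_getElem.mp (ha.mem_iff.mpr hx)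
        have : j = 0 := by omega
        subst this
        rw [pvFst_eq a 0 (by omega)]
      have hsum : pvEaten ts (pvFst a 0) = ts.sum := pvEaten_all ts _ hmaxall
      have hsneg : pvEaten ts (pvFst a 0) ≤ 0 := pvEaten_nonpos ts _ (by omega)
      rw [altB_neg ts k hk (by omega)]
    · rw [if_neg (by omega)]
      have hadj : pvFst a 0 ≤ pvFst a 1 := by
        rw [pvFst_eq a 0 (by omega), pvFst_eq a 1 (by omega)]
        exact (List.pairwise_iff_getElem.mp hs) 0 1 (by omega) (by omega) (by omega)
      have hmain := aloop_spec ts k hne hk a ha hs f 1 (pvFst a 0)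
        (k - pvFst a 0 * ((f + 1 : Nat) : Int))
        (by omega) (by omega)
        (by have := mul_neg_of_neg_of_pos hs0' hnpos; omega)
        hadj
        (by intro j hj; rw [Nat.lt_one_iff.mp hj])
        (by rw [heat])
      rw [hf] at hmain
      simpa using hmain
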